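-- pv_equiv track=rewrite | github.com/wenet-e2e/wenet | examples/vkw2021/s0/local/vkw_kws_results.py | get_labformat_frames
-- ===== SOURCE A (Python) =====
-- def get_labformat_frames(timestamp, subsample, char_dict):
--     begin = 0
--     duration = 0
--     word_seq = []
--     word_time = []
--     for idx, t in enumerate(timestamp):
--         duration = len(t) * subsample
--         if idx < len(timestamp) - 1:
--             word_seq.append(char_dict[t[-1]])
--             word_time.append([begin, begin + duration])
--         else:
--             non_blank = 0
--             token = 0
--             for i in t:
--                 if i != 0:
--                     token = i
--                     break
--             word_seq.append(char_dict[token])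
--             word_time.append([begin, begin + duration])
--         begin = begin + duration
--     return word_seq, word_time
-- ===== SOURCE B (Python) =====
-- def get_labformat_frames(timestamp, subsample, char_dict):
--     durations = [len(t) * subsample for t in timestamp]
--     begins = []
--     acc = 0
--     for d in durations:
--         begins.append(acc)
--         acc += d
--     word_time = [[b, b + d] for b, d in zip(begins, durations)]
--     word_seq = [char_dict[t[-1]] for t in timestamp[:-1]]
--     if timestamp:
--         last = timestamp[-1]
--         word_seq.append(char_dict[next((i for i in last if i != 0), 0)])
--     return word_seq, word_time
-- ===== Notes on version B (the rewrite author's own statement) =====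
-- stated objective: alternative
-- what changed: A's single loop carrying a running begin and an idx<len-1 branch is replaced by separate passes: per-entry durations, an exclusive prefix sum of begins, a zip building word_time, and word_seq assembled from timestamp[:-1] plus the last entry's first-nonzero token.
import Mathlib
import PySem

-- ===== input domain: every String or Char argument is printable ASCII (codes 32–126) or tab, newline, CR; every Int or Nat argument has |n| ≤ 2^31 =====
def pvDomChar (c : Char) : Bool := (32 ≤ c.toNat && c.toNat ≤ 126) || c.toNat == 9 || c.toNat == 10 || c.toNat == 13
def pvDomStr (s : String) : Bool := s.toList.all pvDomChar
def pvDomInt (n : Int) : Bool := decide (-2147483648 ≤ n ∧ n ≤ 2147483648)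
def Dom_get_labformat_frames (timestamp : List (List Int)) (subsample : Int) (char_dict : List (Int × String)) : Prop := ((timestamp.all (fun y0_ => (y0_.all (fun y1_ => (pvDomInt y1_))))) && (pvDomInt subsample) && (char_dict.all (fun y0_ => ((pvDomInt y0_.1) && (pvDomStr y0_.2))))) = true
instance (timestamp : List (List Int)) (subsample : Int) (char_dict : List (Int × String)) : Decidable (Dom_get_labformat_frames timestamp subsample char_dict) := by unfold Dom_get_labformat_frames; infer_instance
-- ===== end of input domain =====

-- B replaces A's single stateful loop (running `begin` plus an idx<len-1 branch) by separate
-- passes: durations, an exclusive prefix sum of begins, a zip for word_time, and word_seq built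
-- from timestamp[:-1] plus the last element's first-nonzero token; same cost, plainer structure.

-- ===== PORT A =====
-- A's inner `for i in t: if i != 0: token = i; break` (token initialised to 0)
def pvToken : List Int → Int
  | [] => 0
  | i :: rest => if i ≠ 0 then i else pvToken rest

def get_labformat_frames (timestamp : List (List Int)) (subsample : Int) (char_dict : List (Int × String)) : List String × List (List Int) :=
  -- char_dict[k] is association-list first-match lookup; "" default is only reached outside Pre_
  let st := (PySem.List.enumerate timestamp).foldl
    (fun (st : Int × List String × List (List Int)) it =>
      let duration := ((it.2.length : Int)) * subsample
      if it.1 < (timestamp.length : Int) - 1 then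
        (st.1 + duration,
         st.2.1 ++ [(char_dict.lookup ((PySem.List.pyGet? it.2 (-1)).getD 0)).getD ""],
         st.2.2 ++ [[st.1, st.1 + duration]])
      else
        (st.1 + duration,
         st.2.1 ++ [(char_dict.lookup (pvToken it.2)).getD ""],
         st.2.2 ++ [[st.1, st.1 + duration]]))
    (0, [], [])
  (st.2.1, st.2.2)

-- ===== PORT B =====
def get_labformat_frames_alt (timestamp : List (List Int)) (subsample : Int) (char_dict : List (Int × String)) : List String × List (List Int) :=
  let durations := timestamp.map (fun t => ((t.length : Int)) * subsample)
  let begins := (durations.foldl (fun (p : List Int × Int) d => (p.1 ++ [p.2], p.2 + d)) ([], 0)).1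
  let word_time := (begins.zip durations).map (fun bd => [bd.1, bd.1 + bd.2])
  let word_seq0 := (PySem.List.slice timestamp none (some (-1))).map
      (fun t => (char_dict.lookup ((PySem.List.pyGet? t (-1)).getD 0)).getD "")
  let word_seq := match PySem.List.pyGet? timestamp (-1) with
    | none => word_seq0
    | some last => word_seq0 ++ [(char_dict.lookup ((last.find? (fun i => i != 0)).getD 0)).getD ""]
  (word_seq, word_time)

-- ===== PRECONDITION & SPEC =====
-- Pre_ excludes exactly the inputs where Python A raises: an empty non-last timestamp entry
-- (IndexError on t[-1]) or a looked-up token missing from char_dict (KeyError).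
def Pre_get_labformat_frames (timestamp : List (List Int)) (subsample : Int) (char_dict : List (Int × String)) : Prop :=
  (∀ t ∈ timestamp.dropLast, t ≠ [] ∧ (char_dict.lookup ((PySem.List.pyGet? t (-1)).getD 0)).isSome = true) ∧
  (timestamp ≠ [] → (char_dict.lookup (((timestamp.getLast?.getD []).find? (fun i => i != 0)).getD 0)).isSome = true)
instance (timestamp : List (List Int)) (subsample : Int) (char_dict : List (Int × String)) : Decidable (Pre_get_labformat_frames timestamp subsample char_dict) := by unfold Pre_get_labformat_frames; infer_instance

def pvWitness_get_labformat_frames : List (List Int) × Int × (List (Int × String)) :=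
  ([[0, 3], [2], [0, 0]], 4, [(0, "eps"), (2, "b"), (3, "a")])

def Spec_get_labformat_frames (timestamp : List (List Int)) (subsample : Int) (char_dict : List (Int × String)) (out : List String × List (List Int)) : Prop := out = get_labformat_frames_alt timestamp subsample char_dict
instance (timestamp : List (List Int)) (subsample : Int) (char_dict : List (Int × String)) (out : List String × List (List Int)) : Decidable (Spec_get_labformat_frames timestamp subsample char_dict out) := by unfold Spec_get_labformat_frames; infer_instance

-- ===== CLAIM (what is proved, stated in full; the proofs are below) =====
def Claim_equal_get_labformat_frames : Prop := ∀ (timestamp : List (List Int)) (subsample : Int) (char_dict : List (Int × String)), Dom_get_labformat_frames timestamp subsample char_dict → Pre_get_labformat_frames timestamp subsample char_dict → Spec_get_labformat_frames timestamp subsample char_dict (get_labformat_frames timestamp subsample char_dict)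

-- ===== LEMMAS AND PROOFS =====

-- common reference shapes of the two outputs
def gSeq (cd : List (Int × String)) : List (List Int) → List String
  | [] => []
  | [t] => [(cd.lookup (pvToken t)).getD ""]
  | t :: r => (cd.lookup (t.getLast?.getD 0)).getD "" :: gSeq cd r

def gTime (sub : Int) : List (List Int) → Int → List (List Int)
  | [], _ => []
  | t :: r, b => [b, b + (t.length : Int) * sub] :: gTime sub r (b + (t.length : Int) * sub)

def gSum (sub : Int) (ts : List (List Int)) : Int := (ts.map (fun t => ((t.length : Int)) * sub)).sum

lemma pvToken_eq_find (t : List Int) : pvToken t = (t.find? (fun i => i != 0)).getD 0 := by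
  induction t with
  | nil => rfl
  | cons i r ih =>
    by_cases h : i = 0
    · simp [pvToken, List.find?, h, ih]
    · have hb : (i != 0) = true := by simp [h]
      simp [pvToken, List.find?, h, hb]

-- A's fold characterised (n is the total length, k the enumerate start)
lemma foldA (cd : List (Int × String)) (sub : Int) (n : Int)
    (ts : List (List Int)) (k : Int) (hk : k + ts.length = n) (hne : ts ≠ [])
    (b : Int) (ws : List String) (wt : List (List Int)) :
    (PySem.List.enumerate ts k).foldl
      (fun (st : Int × List String × List (List Int)) it =>
        let duration := ((it.2.length : Int)) * sub
        if it.1 < n - 1 then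
          (st.1 + duration,
           st.2.1 ++ [(cd.lookup ((PySem.List.pyGet? it.2 (-1)).getD 0)).getD ""],
           st.2.2 ++ [[st.1, st.1 + duration]])
        else
          (st.1 + duration,
           st.2.1 ++ [(cd.lookup (pvToken it.2)).getD ""],
           st.2.2 ++ [[st.1, st.1 + duration]]))
      (b, ws, wt)
    = (b + gSum sub ts, ws ++ gSeq cd ts, wt ++ gTime sub ts b) := by
  induction ts generalizing k b ws wt with
  | nil => exact absurd rfl hne
  | cons t r ih =>
    rcases r with _ | ⟨t', r'⟩
    · have hkn : ¬ (k < n - 1) := by simp at hk; omega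
      simp [PySem.List.enumerate_cons, PySem.List.enumerate_nil, gSeq, gTime, gSum, hkn]
    · have hkn : k < n - 1 := by simp at hk; omega
      have hk' : (k + 1) + ((t' :: r') : List (List Int)).length = n := by simp at hk ⊢; omega
      rw [PySem.List.enumerate_cons]
      simp only [List.foldl_cons]
      rw [if_pos hkn] at *
      rw [ih (k + 1) hk' (by simp)]
      simp [gSeq, gTime, gSum, List.append_assoc, PySem.List.pyGet?_neg_one]
      ring

-- B's begins fold characterised
def beginsOf : List Int → Int → List Int
  | [], _ => []
  | d :: r, b => b :: beginsOf r (b + d)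

lemma foldB (ds : List Int) (acc : List Int) (b : Int) :
    (ds.foldl (fun (p : List Int × Int) d => (p.1 ++ [p.2], p.2 + d)) (acc, b)).1
    = acc ++ beginsOf ds b := by
  induction ds generalizing acc b with
  | nil => simp [beginsOf]
  | cons d r ih => simp [beginsOf, ih, List.append_assoc]

lemma zipTime (sub : Int) (ts : List (List Int)) (b : Int) :
    ((beginsOf (ts.map (fun t => ((t.length : Int)) * sub)) b).zip
      (ts.map (fun t => ((t.length : Int)) * sub))).map (fun bd => [bd.1, bd.1 + bd.2])
    = gTime sub ts b := by
  induction ts generalizing b with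
  | nil => rfl
  | cons t r ih => simp [beginsOf, gTime, ih]

lemma seqB (cd : List (Int × String)) (ts : List (List Int)) (hne : ts ≠ []) :
    (ts.dropLast.map (fun t => (cd.lookup (t.getLast?.getD 0)).getD ""))
      ++ [(cd.lookup (((ts.getLast hne).find? (fun i => i != 0)).getD 0)).getD ""]
    = gSeq cd ts := by
  induction ts with
  | nil => exact absurd rfl hne
  | cons t r ih =>
    rcases r with _ | ⟨t', r'⟩
    · simp [gSeq, pvToken_eq_find]
    · rw [show (t :: t' :: r').dropLast = t :: (t' :: r').dropLast from rfl,
          List.getLast_cons (by simp)]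
      simp only [List.map_cons, List.cons_append]
      rw [ih (by simp)]
      rfl

-- ===== VERDICT (by name: the statement is the Claim_ definition above) =====
theorem get_labformat_frames_spec : Claim_equal_get_labformat_frames := by
  intro ts sub cd _ _
  unfold Spec_get_labformat_frames get_labformat_frames get_labformat_frames_alt
  rcases ts with _ | ⟨t, r⟩
  · rfl
  · have hne : (t :: r : List (List Int)) ≠ [] := by simp
    rw [foldA cd sub ((t :: r : List (List Int)).length : Int) (t :: r) 0 (by simp) hne 0 [] []]
    simp only [PySem.List.slice_to_neg_one, PySem.List.pyGet?_neg_one,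
      List.getLast?_eq_some_getLast hne]
    rw [foldB _ [] 0]
    simp only [List.nil_append]
    rw [zipTime, seqB cd (t :: r) hne]
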